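-- pv_equiv track=rewrite | github.com/AlexKazm/telegram-cms | services/telegram/plugins/image_generator/main.py | update_increment_strings_indexes
-- ===== SOURCE A (Python) =====
-- from typing import List
--
-- def update_increment_strings_indexes(indexes: List[int]):
--     indexes.reverse()
--     i = 0
--     for index in indexes:
--         if i == 0:
--             indexes[i] += 1
--         else:
--             indexes[i] = indexes[0] + i
--         i += 1
--
--     return indexes
-- ===== SOURCE B (Python) =====
-- from typing import List
--
-- def update_increment_strings_indexes(indexes: List[int]):
--     if indexes:
--         base = indexes[-1] + 1
--         for i in range(len(indexes)):
--             indexes[i] = base + i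
--     return indexes
-- ===== Notes on version B (the rewrite author's own statement) =====
-- stated objective: simpler
-- what changed: B drops A's reverse-then-overwrite loop: since every position is rewritten from the (reversed) first element, only the original last element matters, so B fills position i with last+1+i directly in place.
import Mathlib
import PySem

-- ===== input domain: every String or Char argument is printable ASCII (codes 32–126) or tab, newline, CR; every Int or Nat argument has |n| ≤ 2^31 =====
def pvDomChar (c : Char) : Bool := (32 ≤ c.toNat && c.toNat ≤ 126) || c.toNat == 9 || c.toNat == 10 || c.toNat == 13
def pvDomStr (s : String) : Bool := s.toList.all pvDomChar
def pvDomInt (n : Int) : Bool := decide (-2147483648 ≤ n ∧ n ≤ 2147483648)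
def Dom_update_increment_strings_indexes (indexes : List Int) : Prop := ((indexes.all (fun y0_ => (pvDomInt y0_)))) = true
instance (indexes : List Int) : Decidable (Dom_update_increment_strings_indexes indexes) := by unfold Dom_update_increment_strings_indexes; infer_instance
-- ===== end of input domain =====

-- B drops A's reverse-then-overwrite loop and fills indexes[i] = indexes[-1] + 1 + i directly
-- (objective: simpler). Both Pythons mutate the argument in place and return it; the
-- equivalence proved here is about the RETURN value only.

-- ===== PORT A =====
-- A reverses, then loops with a counter i over the (length-stable) list:
-- i == 0: indexes[0] += 1; otherwise: indexes[i] = indexes[0] + i.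
def update_increment_strings_indexes (indexes : List Int) : List Int :=
  (List.range indexes.reverse.length).foldl
    (fun l i =>
      if i = 0 then l.set 0 (l.getD 0 0 + 1)
      else l.set i (l.getD 0 0 + (i : Int))) indexes.reverse

-- ===== PORT B =====
-- B: if the list is nonempty, base = indexes[-1] + 1 and position i becomes base + i.
def update_increment_strings_indexes_alt (indexes : List Int) : List Int :=
  match indexes.getLast? with
  | none => indexes
  | some last => (List.range indexes.length).map (fun i : Nat => last + 1 + (i : Int))

-- ===== PRECONDITION & SPEC =====
def Spec_update_increment_strings_indexes (indexes : List Int) (out : List Int) : Prop := out = update_increment_strings_indexes_alt indexes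
instance (indexes : List Int) (out : List Int) : Decidable (Spec_update_increment_strings_indexes indexes out) := by unfold Spec_update_increment_strings_indexes; infer_instance

-- ===== CLAIM (what is proved, stated in full; the proofs are below) =====
def Claim_equal_update_increment_strings_indexes : Prop := ∀ (indexes : List Int), Dom_update_increment_strings_indexes indexes → Spec_update_increment_strings_indexes indexes (update_increment_strings_indexes indexes)

-- ===== LEMMAS AND PROOFS =====

theorem getD_set_ne (l : List Int) (i : ℕ) (v : Int) (hi : i ≠ 0) :
    (l.set i v).getD 0 0 = l.getD 0 0 := by
  simp [List.getD, hi]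

/-- After the first step, every remaining iteration (i ≥ 1) writes `b + i` at
position i, where `b` is the (never again modified) element at position 0. -/
theorem aloop_getElem? (m : ℕ) : ∀ (k : ℕ), 1 ≤ k → ∀ (l : List Int) (b : Int),
    l.getD 0 0 = b → ∀ (j : ℕ),
    ((List.range' k m).foldl
      (fun l i =>
        if i = 0 then l.set 0 (l.getD 0 0 + 1)
        else l.set i (l.getD 0 0 + (i : Int))) l)[j]?
    = if k ≤ j ∧ j < k + m ∧ j < l.length then some (b + (j : Int)) else l[j]? := by
  induction m with
  | zero =>
    intro k hk l b hb j
    simp only [List.range', List.foldl_nil]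
    exact (if_neg (by omega)).symm
  | succ m ih =>
    intro k hk l b hb j
    rw [List.range'_succ, List.foldl_cons]
    have hk0 : k ≠ 0 := by omega
    simp only [hk0, if_false, hb]
    rw [ih (k + 1) (by omega) (l.set k (b + (k : Int))) b
      (by rw [getD_set_ne l k _ hk0, hb]) j]
    rw [List.length_set, List.getElem?_set]
    by_cases hjk : k = j
    · rw [if_pos hjk]
      subst hjk
      by_cases hl : k < l.length
      · rw [if_neg (by omega), if_pos hl, if_pos ⟨le_refl k, by omega, hl⟩]
      · rw [if_neg (by omega), if_neg hl, if_neg (by omega),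
          List.getElem?_eq_none (by omega)]
    · rw [if_neg hjk]
      split_ifs with h1 h2 h2 <;> first | rfl | omega

theorem update_increment_strings_indexes_eq (indexes : List Int) :
    update_increment_strings_indexes indexes = update_increment_strings_indexes_alt indexes := by
  cases h : indexes.getLast? with
  | none =>
    have he : indexes = [] := List.getLast?_eq_none_iff.mp h
    subst he
    rfl
  | some last =>
    have hB : update_increment_strings_indexes_alt indexes
        = (List.range indexes.length).map (fun i : Nat => last + 1 + (i : Int)) := by
      simp [update_increment_strings_indexes_alt, h]
    have hne : indexes ≠ [] := by
      intro he; subst he; simp at h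
    obtain ⟨m, hm⟩ : ∃ m, indexes.reverse.length = m + 1 := by
      cases hl : indexes.reverse.length with
      | zero => exact absurd (by simpa using List.length_eq_zero_iff.mp hl) hne
      | succ m => exact ⟨m, rfl⟩
    have h0 : 0 < indexes.reverse.length := by omega
    have hh : indexes.reverse.head? = some last := by rw [List.head?_reverse, h]
    obtain ⟨a, t, hr⟩ := List.exists_cons_of_ne_nil
      (show indexes.reverse ≠ [] by intro he; rw [he] at h0; simp at h0)
    have ha : a = last := by rw [hr] at hh; simpa using hh
    have hhead : indexes.reverse.getD 0 0 = last := by simp [hr, List.getD, ha]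
    have hlen : indexes.length = m + 1 := by
      rw [← List.length_reverse, hm]
    have hset : (indexes.reverse.set 0 (indexes.reverse.getD 0 0 + 1)).getD 0 0
        = last + 1 := by
      simp [hr, List.getD, ha]
    rw [hB, update_increment_strings_indexes]
    apply List.ext_getElem?
    intro j
    rw [hm, List.range_eq_range', List.range'_succ, List.foldl_cons]
    simp only [if_true, Nat.zero_add]
    rw [aloop_getElem? m 1 (by omega) _ (last + 1) hset j]
    rw [List.length_set, hm, List.getElem?_map]
    by_cases hj : j < m + 1
    · rw [List.getElem?_range (by rw [hlen]; omega)]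
      by_cases hj0 : j = 0
      · subst hj0
        rw [if_neg (by omega), List.getElem?_set_self h0, hhead]
        simp
      · rw [if_pos ⟨by omega, by omega, hj⟩]
        simp
    · rw [if_neg (by omega), List.getElem?_set_ne (by omega : (0:ℕ) ≠ j),
        List.getElem?_eq_none (by rw [hm]; omega),
        List.getElem?_eq_none (by rw [List.length_range, hlen]; omega)]
      simp

-- ===== VERDICT (by name: the statement is the Claim_ definition above) =====
theorem update_increment_strings_indexes_spec : Claim_equal_update_increment_strings_indexes := by
  intro indexes _
  exact update_increment_strings_indexes_eq indexes
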